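-- pv_equiv track=rewrite | github.com/dattalab/moseq2-app | dlc_utils/analysis.py | get_syllable_slices
-- ===== SOURCE A (Python) =====
-- def get_syllable_slices(labels, max_syllable):#, total):
--     slices, slices_idx, tmp, tmp_idx = [], [], [], []
--
--     for i, l in enumerate(labels):
--         if len(tmp) == 0:
--             tmp.append(l)
--             tmp_idx.append(i)
--         elif len(tmp) > 0 and tmp[-1] == l:
--             tmp.append(l)
--             tmp_idx.append(i)
--         elif len(tmp) > 0 and tmp[-1] != l:
--             slices.append(tmp)
--             slices_idx.append(tmp_idx)
--             tmp_idx = [i]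
--             tmp = [l]
--
--     syllables = range(0, max_syllable)
--     dct = {}
--     for syll in syllables:
--         dct[syll] = {'slices': [], 'ts': []}
--
--     for j in range(len(slices)):
--         compnum = slices[j][0]
--         if compnum in list(dct.keys()):
--             dct[compnum]['slices'].append(slices[j])
--             dct[compnum]['ts'].append(slices_idx[j])
--
--     return dct
-- ===== SOURCE B (Python) =====
-- def get_syllable_slices(labels, max_syllable):
--     # different decomposition: find transition indices first, then emit each run
--     # between successive transitions; the run after the last transition is never
--     # emitted, matching A (A never flushes its final tmp run).
--     dct = {syll: {'slices': [], 'ts': []} for syll in range(max_syllable)}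
--     cuts = [i for i in range(1, len(labels)) if labels[i] != labels[i - 1]]
--     start = 0
--     for t in cuts:
--         c = labels[start]
--         if 0 <= c < max_syllable:
--             dct[c]['slices'].append(labels[start:t])
--             dct[c]['ts'].append(list(range(start, t)))
--         start = t
--     return dct
-- ===== Notes on version B (the rewrite author's own statement) =====
-- stated objective: faster
-- what changed: B precomputes the list of transition indices and emits each run between successive transitions with a running start cursor (naturally dropping the run after the last transition, as A does), bucketing with a direct 0 <= label < max_syllable range test instead of A's stateful tmp-accumulator loop followed by an index loop that rebuilds and scans list(dct.keys()) for every run.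
import Mathlib
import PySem

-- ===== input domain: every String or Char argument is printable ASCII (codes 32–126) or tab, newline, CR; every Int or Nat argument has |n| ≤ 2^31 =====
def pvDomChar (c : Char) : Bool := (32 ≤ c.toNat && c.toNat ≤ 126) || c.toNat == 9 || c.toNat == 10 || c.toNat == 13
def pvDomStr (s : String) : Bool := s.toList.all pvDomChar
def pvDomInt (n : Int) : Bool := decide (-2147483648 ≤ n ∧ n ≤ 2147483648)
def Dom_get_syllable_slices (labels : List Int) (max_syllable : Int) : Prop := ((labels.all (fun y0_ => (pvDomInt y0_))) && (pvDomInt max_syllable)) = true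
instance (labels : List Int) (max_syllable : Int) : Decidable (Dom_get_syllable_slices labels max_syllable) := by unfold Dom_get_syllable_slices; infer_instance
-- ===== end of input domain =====

-- B groups runs by precomputed transition indices instead of A's stateful tmp-accumulator
-- loop, and tests 0 <= label < max_syllable directly instead of scanning the key list.

-- ===== PORT A =====
-- {syll: {'slices': …, 'ts': …}} is modelled as Dict Int (slices × ts); rendered at return
-- as the required association list with the two string keys in insertion order.
def gssEmptyBuckets (max_syllable : Int) : PySem.Dict Int (List (List Int) × List (List Int)) :=
  (PySem.List.pyRange 0 max_syllable 1).foldl (fun d syll => d.insert syll ([], [])) PySem.Dict.empty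

def gssRender (d : PySem.Dict Int (List (List Int) × List (List Int))) :
    List (Int × List (String × List (List Int))) :=
  d.items.map (fun p => (p.1, [("slices", p.2.1), ("ts", p.2.2)]))

def gssStepA (st : List (List Int) × List (List Int) × List Int × List Int) (p : Int × Int) :
    List (List Int) × List (List Int) × List Int × List Int :=
  let slices := st.1; let slices_idx := st.2.1; let tmp := st.2.2.1; let tmp_idx := st.2.2.2
  let i := p.1; let l := p.2
  if tmp.length = 0 then (slices, slices_idx, tmp ++ [l], tmp_idx ++ [i])
  else if 0 < tmp.length ∧ PySem.List.pyGet? tmp (-1) = some l then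
    (slices, slices_idx, tmp ++ [l], tmp_idx ++ [i])
  else if 0 < tmp.length ∧ PySem.List.pyGet? tmp (-1) ≠ some l then
    (slices ++ [tmp], slices_idx ++ [tmp_idx], [l], [i])
  else st

def get_syllable_slices (labels : List Int) (max_syllable : Int) :
    List (Int × List (String × List (List Int))) :=
  let st := (PySem.List.enumerate labels 0).foldl gssStepA ([], [], [], [])
  let slices := st.1
  let slices_idx := st.2.1
  let dct := (PySem.List.pyRange 0 (slices.length : Int) 1).foldl (fun d j =>
      let compnum := PySem.List.pyGetD (PySem.List.pyGetD slices j []) 0 0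
      if d.contains compnum then
        d.modify compnum ([], []) (fun p =>
          (p.1 ++ [PySem.List.pyGetD slices j []], p.2 ++ [PySem.List.pyGetD slices_idx j []]))
      else d) (gssEmptyBuckets max_syllable)
  gssRender dct

-- ===== PORT B =====
def get_syllable_slices_alt (labels : List Int) (max_syllable : Int) :
    List (Int × List (String × List (List Int))) :=
  let cuts := (PySem.List.pyRange 1 (labels.length : Int) 1).filter
      (fun i => !(PySem.List.pyGetD labels i 0 == PySem.List.pyGetD labels (i - 1) 0))
  let res := cuts.foldl (fun st t =>
      let c := PySem.List.pyGetD labels st.2 0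
      let d := if 0 ≤ c ∧ c < max_syllable then
          st.1.modify c ([], []) (fun p =>
            (p.1 ++ [PySem.List.slice labels (some st.2) (some t)],
             p.2 ++ [PySem.List.pyRange st.2 t 1]))
        else st.1
      (d, t)) (gssEmptyBuckets max_syllable, 0)
  gssRender res.1

-- ===== PRECONDITION & SPEC =====
def Spec_get_syllable_slices (labels : List Int) (max_syllable : Int) (out : List (Int × List (String × List (List Int)))) : Prop := out = get_syllable_slices_alt labels max_syllable
instance (labels : List Int) (max_syllable : Int) (out : List (Int × List (String × List (List Int)))) : Decidable (Spec_get_syllable_slices labels max_syllable out) := by unfold Spec_get_syllable_slices; infer_instance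

-- ===== CLAIM (what is proved, stated in full; the proofs are below) =====
def Claim_equal_get_syllable_slices : Prop := ∀ (labels : List Int) (max_syllable : Int), Dom_get_syllable_slices labels max_syllable → Spec_get_syllable_slices labels max_syllable (get_syllable_slices labels max_syllable)

-- ===== LEMMAS AND PROOFS =====

-- the run list A's first loop produces: consume xs from index i with current run (tmp, ti)
def runsAux : List Int → Int → List Int → List Int → List (List Int × List Int)
  | [], _, _, _ => []
  | x :: xs, i, tmp, ti =>
    if tmp.getLast? = some x then runsAux xs (i + 1) (tmp ++ [x]) (ti ++ [i])
    else (tmp, ti) :: runsAux xs (i + 1) [x] [i]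

-- the (start, stop) intervals B's cut loop walks through
def gssIntervals : Int → List Int → List (Int × Int)
  | _, [] => []
  | s, t :: ts => (s, t) :: gssIntervals t ts

def gssPairify (labels : List Int) (q : Int × Int) : List Int × List Int :=
  (PySem.List.slice labels (some q.1) (some q.2), PySem.List.pyRange q.1 q.2 1)

def gssCutsFrom (labels : List Int) (m : Int) : List Int :=
  (PySem.List.pyRange m (labels.length : Int) 1).filter
    (fun i => !(PySem.List.pyGetD labels i 0 == PySem.List.pyGetD labels (i - 1) 0))

lemma gss_A1 (xs : List Int) : ∀ (i : Int) (s si : List (List Int)) (tmp ti : List Int), tmp ≠ [] →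
    ((PySem.List.enumerate xs i).foldl gssStepA (s, si, tmp, ti)).1 =
      s ++ (runsAux xs i tmp ti).map (·.1) ∧
    ((PySem.List.enumerate xs i).foldl gssStepA (s, si, tmp, ti)).2.1 =
      si ++ (runsAux xs i tmp ti).map (·.2) := by
  induction xs with
  | nil => intro i s si tmp ti _; simp [PySem.List.enumerate_nil, runsAux]
  | cons x xs ih =>
    intro i s si tmp ti htmp
    rw [PySem.List.enumerate_cons]
    simp only [List.foldl_cons]
    have hlen : ¬ tmp.length = 0 := by simpa [List.length_eq_zero_iff] using htmp
    by_cases h : tmp.getLast? = some x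
    · have hstep : gssStepA (s, si, tmp, ti) (i, x) = (s, si, tmp ++ [x], ti ++ [i]) := by
        simp [gssStepA, hlen, PySem.List.pyGet?_neg_one, h, Nat.pos_of_ne_zero hlen]
      rw [hstep, runsAux, if_pos h]
      exact ih (i + 1) s si (tmp ++ [x]) (ti ++ [i]) (by simp)
    · have hstep : gssStepA (s, si, tmp, ti) (i, x) = (s ++ [tmp], si ++ [ti], [x], [i]) := by
        simp [gssStepA, hlen, PySem.List.pyGet?_neg_one, h, Nat.pos_of_ne_zero hlen]
      rw [hstep, runsAux, if_neg h]
      obtain ⟨h1, h2⟩ := ih (i + 1) (s ++ [tmp]) (si ++ [ti]) [x] [i] (by simp)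
      rw [h1, h2]; simp

lemma gss_slice_succ (labels : List Int) (st m : Nat) (h1 : st ≤ m) (h2 : m < labels.length) :
    PySem.List.slice labels (some (st : Int)) (some ((m : Int) + 1)) =
      PySem.List.slice labels (some (st : Int)) (some (m : Int)) ++ [labels[m]] := by
  have : ((m : Int) + 1) = ((m + 1 : Nat) : Int) := by push_cast; ring
  rw [this, PySem.List.slice_natCast, PySem.List.slice_natCast]
  have hsub : m + 1 - st = (m - st) + 1 := by omega
  rw [hsub, List.take_add_one]
  have : (labels.drop st)[m - st]? = some labels[m] := by
    rw [List.getElem?_drop]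
    have : st + (m - st) = m := by omega
    rw [this, List.getElem?_eq_getElem h2]
  rw [this]
  simp

lemma gss_core (labels : List Int) : ∀ (k m st : Nat), m + k = labels.length → st < m →
    (gssIntervals (st : Int) (gssCutsFrom labels (m : Int))).map (gssPairify labels) =
      runsAux (labels.drop m) (m : Int)
        (PySem.List.slice labels (some (st : Int)) (some (m : Int)))
        (PySem.List.pyRange (st : Int) (m : Int) 1) ∧
    (∀ q ∈ gssIntervals (st : Int) (gssCutsFrom labels (m : Int)),
      (st : Int) ≤ q.1 ∧ q.1 < q.2 ∧ q.2 ≤ (labels.length : Int)) := by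
  intro k
  induction k with
  | zero =>
    intro m st hmk hst
    have hm : m = labels.length := by omega
    subst hm
    refine ⟨?_, ?_⟩ <;>
      · unfold gssCutsFrom
        rw [PySem.List.pyRange_one_eq_nil le_rfl]
        simp [gssIntervals, runsAux]
  | succ k ih =>
    intro m st hmk hst
    have hmlt : m < labels.length := by omega
    have hm1 : 1 ≤ m := by omega
    have hm1lt : m - 1 < labels.length := by omega
    have hcast : ((m : Int) + 1) = ((m + 1 : Nat) : Int) := by push_cast; ring
    have hgm : PySem.List.pyGetD labels (m : Int) 0 = labels[m] := by
      rw [PySem.List.pyGetD_natCast]; exact List.getD_eq_getElem _ _ hmlt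
    have hgm1 : PySem.List.pyGetD labels ((m : Int) - 1) 0 = labels[m - 1] := by
      have h1 : ((m : Int) - 1) = ((m - 1 : Nat) : Int) := by omega
      rw [h1, PySem.List.pyGetD_natCast]; exact List.getD_eq_getElem _ _ hm1lt
    have hcuts : gssCutsFrom labels (m : Int) =
        (if labels[m] = labels[m - 1] then gssCutsFrom labels ((m + 1 : Nat) : Int)
         else (m : Int) :: gssCutsFrom labels ((m + 1 : Nat) : Int)) := by
      unfold gssCutsFrom
      rw [PySem.List.pyRange_one_cons (by exact_mod_cast hmlt), List.filter_cons, hcast]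
      by_cases hx : labels[m] = labels[m - 1]
      · simp [hgm, hgm1, hx]
      · simp [hgm, hgm1, hx]
    have hdrop : labels.drop m = labels[m] :: labels.drop (m + 1) := by
      rw [List.drop_eq_getElem_cons hmlt]
    have htmp : PySem.List.slice labels (some (st : Int)) (some (m : Int)) =
        PySem.List.slice labels (some (st : Int)) (some ((m - 1 : Nat) : Int)) ++ [labels[m - 1]] := by
      have h := gss_slice_succ labels st (m - 1) (by omega) hm1lt
      have h2 : ((m - 1 : Nat) : Int) + 1 = (m : Int) := by omega
      rwa [h2] at h
    have hlast : (PySem.List.slice labels (some (st : Int)) (some (m : Int))).getLast? =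
        some labels[m - 1] := by
      rw [htmp]; simp
    obtain ⟨ihe, ihb⟩ := ih (m + 1) st (by omega) (by omega)
    obtain ⟨ihe', ihb'⟩ := ih (m + 1) m (by omega) (by omega)
    by_cases hx : labels[m] = labels[m - 1]
    · rw [hcuts, if_pos hx]
      constructor
      · rw [hdrop, runsAux, if_pos (by rw [hlast, hx])]
        rw [← gss_slice_succ labels st m (le_of_lt hst) hmlt]
        rw [← PySem.List.pyRange_one_succ_right (by exact_mod_cast le_of_lt hst)]
        rw [hcast]
        exact ihe
      · exact ihb
    · rw [hcuts, if_neg hx]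
      constructor
      · simp only [gssIntervals, List.map_cons]
        rw [hdrop, runsAux, if_neg (by rw [hlast]; simp; intro h; exact hx h.symm)]
        congr 1
        have hs1 : [labels[m]] = PySem.List.slice labels (some (m : Int)) (some ((m : Int) + 1)) := by
          rw [gss_slice_succ labels m m le_rfl hmlt]
          rw [PySem.List.slice_natCast]
          simp
        have hs2 : [(m : Int)] = PySem.List.pyRange (m : Int) ((m : Int) + 1) 1 :=
          (PySem.List.pyRange_one_singleton _).symm
        rw [hs1, hs2, hcast]
        exact ihe'
      · intro q hq
        rcases List.mem_cons.mp (by simpa [gssIntervals] using hq) with h | h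
        · subst h
          refine ⟨le_refl _, ?_, ?_⟩
          · show (st : Int) < (m : Int); exact_mod_cast hst
          · show (m : Int) ≤ (labels.length : Int); exact_mod_cast le_of_lt hmlt
        · obtain ⟨b1, b2, b3⟩ := ihb' q h
          exact ⟨le_trans (by exact_mod_cast le_of_lt hst) b1, b2, b3⟩

-- B's cut loop, dict component, is the fold over its intervals
lemma gss_B1 (labels : List Int) (max_syllable : Int) (cuts : List Int) :
    ∀ (d : PySem.Dict Int (List (List Int) × List (List Int))) (s : Int),
    (cuts.foldl (fun st t =>
      (if 0 ≤ PySem.List.pyGetD labels st.2 0 ∧ PySem.List.pyGetD labels st.2 0 < max_syllable then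
          st.1.modify (PySem.List.pyGetD labels st.2 0) ([], []) (fun p =>
            (p.1 ++ [PySem.List.slice labels (some st.2) (some t)],
             p.2 ++ [PySem.List.pyRange st.2 t 1]))
        else st.1, t)) (d, s)).1 =
    (gssIntervals s cuts).foldl (fun d q =>
      if 0 ≤ PySem.List.pyGetD labels q.1 0 ∧ PySem.List.pyGetD labels q.1 0 < max_syllable then
        d.modify (PySem.List.pyGetD labels q.1 0) ([], []) (fun p =>
          (p.1 ++ [PySem.List.slice labels (some q.1) (some q.2)],
           p.2 ++ [PySem.List.pyRange q.1 q.2 1]))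
      else d) d := by
  induction cuts with
  | nil => intro d s; simp [gssIntervals]
  | cons t ts ih =>
    intro d s
    simp only [gssIntervals, List.foldl_cons]
    exact ih _ t

lemma gss_keys_empty_buckets (max_syllable : Int) :
    (gssEmptyBuckets max_syllable).keys = PySem.List.pyRange 0 max_syllable 1 := by
  unfold gssEmptyBuckets
  rw [PySem.Dict.keys_foldl_insert]
  simp only [PySem.Dict.keys_empty]
  have : PySem.Set.update ([] : List Int) (PySem.List.pyRange 0 max_syllable 1) =
      PySem.Set.ofList (PySem.List.pyRange 0 max_syllable 1) := rfl
  rw [this, PySem.Set.ofList_eq_self_of_nodup _ (PySem.List.nodup_pyRange_one 0 max_syllable)]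

-- the two bucketing folds over the same interval list agree
lemma gss_buckets (labels : List Int) (max_syllable : Int) (I : List (Int × Int))
    (hI : ∀ q ∈ I, 0 ≤ q.1 ∧ q.1 < q.2 ∧ q.2 ≤ (labels.length : Int)) :
    ∀ (d : PySem.Dict Int (List (List Int) × List (List Int))),
    d.keys = PySem.List.pyRange 0 max_syllable 1 →
    I.foldl (fun d q =>
      if d.contains (PySem.List.pyGetD (gssPairify labels q).1 0 0) then
        d.modify (PySem.List.pyGetD (gssPairify labels q).1 0 0) ([], [])
          (fun r => (r.1 ++ [(gssPairify labels q).1], r.2 ++ [(gssPairify labels q).2]))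
      else d) d =
    I.foldl (fun d q =>
      if 0 ≤ PySem.List.pyGetD labels q.1 0 ∧ PySem.List.pyGetD labels q.1 0 < max_syllable then
        d.modify (PySem.List.pyGetD labels q.1 0) ([], []) (fun p =>
          (p.1 ++ [PySem.List.slice labels (some q.1) (some q.2)],
           p.2 ++ [PySem.List.pyRange q.1 q.2 1]))
      else d) d := by
  induction I with
  | nil => intro d _; rfl
  | cons q I ih =>
    intro d hkeys
    have hqI : ∀ r ∈ I, 0 ≤ r.1 ∧ r.1 < r.2 ∧ r.2 ≤ (labels.length : Int) :=
      fun r hr => hI r (List.mem_cons_of_mem q hr)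
    obtain ⟨hq1, hq2, hq3⟩ := hI q List.mem_cons_self
    obtain ⟨a, ha2⟩ := Int.eq_ofNat_of_zero_le hq1
    obtain ⟨b, hb2⟩ := Int.eq_ofNat_of_zero_le (le_trans hq1 (le_of_lt hq2))
    have hab : a < b := by omega
    have hbn : b ≤ labels.length := by
      rw [hb2] at hq3; exact_mod_cast hq3
    have ha : a < labels.length := by omega
    simp only [List.foldl_cons, gssPairify]
    rw [ha2, hb2]
    have hslice : PySem.List.slice labels (some ((a : Nat) : Int)) (some ((b : Nat) : Int)) =
        labels[a] :: (labels.drop (a + 1)).take (b - a - 1) := by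
      rw [PySem.List.slice_natCast, List.drop_eq_getElem_cons ha]
      have hba : b - a = (b - a - 1) + 1 := by omega
      rw [hba, List.take_succ_cons]
      simp
    have hcA : PySem.List.pyGetD (PySem.List.slice labels (some ((a : Nat) : Int)) (some ((b : Nat) : Int))) 0 0 =
        PySem.List.pyGetD labels ((a : Nat) : Int) 0 := by
      rw [hslice, PySem.List.pyGetD_zero, PySem.List.pyGetD_natCast,
        List.getD_eq_getElem _ _ ha, List.getD_cons_zero]
    set c := PySem.List.pyGetD labels ((a : Nat) : Int) 0 with hcdef
    have hmem : d.contains c = decide (0 ≤ c ∧ c < max_syllable) := by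
      rw [PySem.Dict.contains_eq_decide_mem_keys, hkeys]
      simp [PySem.List.mem_pyRange_one]
    by_cases hcond : 0 ≤ c ∧ c < max_syllable
    · have hcont : d.contains c = true := by rw [hmem]; simpa using hcond
      simp only [hcA, hcont, if_pos hcond, if_true]
      apply ih hqI
      rw [PySem.Dict.keys_modify, PySem.Dict.keys_insert_of_contains _ _ hcont]
      exact hkeys
    · have hcont : d.contains c = false := by rw [hmem]; simpa using hcond
      simp only [hcA, hcont, if_neg hcond, Bool.false_eq_true, if_false]
      exact ih hqI d hkeys

-- ===== VERDICT (by name: the statement is the Claim_ definition above) =====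
theorem get_syllable_slices_spec : Claim_equal_get_syllable_slices := by
  intro labels max_syllable _
  unfold Spec_get_syllable_slices
  cases labels with
  | nil => rfl
  | cons x rest =>
    simp only [get_syllable_slices, get_syllable_slices_alt]
    have hfold : (PySem.List.enumerate (x :: rest) 0).foldl gssStepA ([], [], [], []) =
        (PySem.List.enumerate rest 1).foldl gssStepA ([], [], [x], [0]) := by
      rw [PySem.List.enumerate_cons]
      simp only [List.foldl_cons]
      norm_num [gssStepA]
    obtain ⟨hA1, hA2⟩ := gss_A1 rest 1 [] [] [x] [(0 : Int)] (by simp)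
    simp only [List.nil_append] at hA1 hA2
    obtain ⟨hcore, hbounds⟩ := gss_core (x :: rest) rest.length 1 0 (by simp only [List.length_cons]; omega) (by omega)
    simp only [Nat.cast_one, Nat.cast_zero] at hcore hbounds
    have hsl01 : PySem.List.slice (x :: rest) (some 0) (some 1) = [x] := by
      rw [PySem.List.slice_toNat _ (by norm_num) (by norm_num)]
      rfl
    have hr01 : PySem.List.pyRange 0 1 1 = [0] := rfl
    rw [show (x :: rest).drop 1 = rest from rfl, hsl01, hr01] at hcore
    rw [hfold, hA1, hA2]
    have hb1 : ∀ j : Int, PySem.List.pyGetD ((runsAux rest 1 [x] [0]).map (·.1)) j [] =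
        (PySem.List.pyGetD (runsAux rest 1 [x] [0]) j ([], [])).1 :=
      fun j => PySem.List.pyGetD_map _ _ j ([], [])
    have hb2 : ∀ j : Int, PySem.List.pyGetD ((runsAux rest 1 [x] [0]).map (·.2)) j [] =
        (PySem.List.pyGetD (runsAux rest 1 [x] [0]) j ([], [])).2 :=
      fun j => PySem.List.pyGetD_map _ _ j ([], [])
    simp only [hb1, hb2, List.length_map]
    rw [PySem.List.foldl_pyRange_zero_pyGetD' (runsAux rest 1 [x] [0]) ([], [])
      (fun d p => if d.contains (PySem.List.pyGetD p.1 0 0) then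
        d.modify (PySem.List.pyGetD p.1 0 0) ([], [])
          (fun r => (r.1 ++ [p.1], r.2 ++ [p.2])) else d)
      (gssEmptyBuckets max_syllable)]
    rw [← hcore, List.foldl_map]
    rw [gss_buckets (x :: rest) max_syllable _ hbounds _ (gss_keys_empty_buckets max_syllable)]
    rw [gss_B1 (x :: rest) max_syllable _ (gssEmptyBuckets max_syllable) 0]
    simp only [gssCutsFrom]
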